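-- pv_equiv track=rewrite | github.com/elijp616/Assorted-Python | Old Python/Hw6/HW06.py | animal_locator
-- ===== SOURCE A (Python) =====
-- def animal_locator(dict1):
--     animalp = {}
--     for zoo in dict1:
--         for animalTup in dict1[zoo]:
--             if animalTup[0] in animalp:
--                 animalp[animalTup[0]] = (animalp[animalTup[0]] + animalTup[1])
--             else:
--                 animalp[animalTup[0]] = animalTup[1]
--     for i in animalp:
--         location = []
--         location2 = []
--         cityList = []
--         for zoo in dict1:
--             for animalTup in dict1[zoo]:
--                 if i == animalTup[0]:
--                     if zoo not in cityList:
--                         cityList.append(zoo)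
--                         location2.append((animalTup[1],zoo))
--         location2.sort(reverse = True)
--         similar = []
--         for locations in location2:
--             for location3 in location2:
--                 if (locations[0] == location3[0]) and (locations != location3):
--                     similar.append(locations[1])
--                     similar.append(location3[1])
--                     similar.sort(reverse = True)
--             location.append(locations[1])
--         animalp[i] = (location,animalp[i])
--     return animalp
-- ===== SOURCE B (Python) =====
-- def animal_locator(dict1):
--     # One pass over the data: total count per animal, and per animal the
--     # (count, zoo) pair of its first tuple in each zoo, grouped as we go.
--     totals = {}
--     occ = {}
--     for zoo in dict1:
--         seen = set()
--         for animal, cnt in dict1[zoo]: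
--             totals[animal] = totals.get(animal, 0) + cnt
--             if animal not in seen:
--                 seen.add(animal)
--                 occ.setdefault(animal, []).append((cnt, zoo))
--     return {animal: ([z for _, z in sorted(occ[animal], reverse=True)], total)
--             for animal, total in totals.items()}
-- ===== Notes on version B (the rewrite author's own statement) =====
-- stated objective: faster
-- what changed: B replaces A's per-animal rescan of the whole input (and A's dead quadratic 'similar' pass) with a single grouping pass that builds animal->total and animal->[(count,zoo)] dictionaries, then sorts each small list once.
import Mathlib
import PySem

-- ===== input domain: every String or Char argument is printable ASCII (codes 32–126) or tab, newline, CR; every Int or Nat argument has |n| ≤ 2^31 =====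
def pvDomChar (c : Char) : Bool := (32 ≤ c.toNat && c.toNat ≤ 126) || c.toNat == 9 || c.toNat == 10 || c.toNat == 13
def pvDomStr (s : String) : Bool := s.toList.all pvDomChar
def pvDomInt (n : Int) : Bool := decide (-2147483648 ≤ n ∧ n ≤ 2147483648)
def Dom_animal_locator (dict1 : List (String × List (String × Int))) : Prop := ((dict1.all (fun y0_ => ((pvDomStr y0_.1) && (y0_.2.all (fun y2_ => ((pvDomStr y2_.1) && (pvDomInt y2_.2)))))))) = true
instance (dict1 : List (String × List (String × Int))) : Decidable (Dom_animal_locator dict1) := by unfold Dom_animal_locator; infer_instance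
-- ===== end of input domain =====

-- B replaces A's per-animal rescan of the whole input (plus a dead quadratic `similar` pass)
-- with one grouping pass, then one reverse sort per animal (objective: faster).

-- ===== PORT A =====
-- Python's `similar` list is computed but never read, so it does not appear here;
-- `animalp[i]` is read before key i is overwritten, so it is the item's own total p.2.
def animal_locator (dict1 : List (String × List (String × Int))) : List (String × List String × Int) :=
  let animalp : PySem.Dict String Int :=
    dict1.foldl (fun d zp =>
      zp.2.foldl (fun d t =>
        if d.contains t.1 then d.insert t.1 (d.getD t.1 0 + t.2)
        else d.insert t.1 t.2) d) PySem.Dict.empty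
  (animalp.items.foldl (fun (res : PySem.Dict String (List String × Int)) p =>
      let pass := dict1.foldl (fun (st : List String × List (Int × String)) zp =>
          zp.2.foldl (fun (st : List String × List (Int × String)) t =>
            if p.1 == t.1 then
              if st.1.contains zp.1 = false then (st.1 ++ [zp.1], st.2 ++ [(t.2, zp.1)])
              else st
            else st) st) (([], []) : List String × List (Int × String))
      let location2 := PySem.List.sorted2 pass.2 (fun q => q.1) (fun q => q.2) true
      let location := location2.foldl (fun loc q => loc ++ [q.2]) ([] : List String)
      res.insert p.1 (location, p.2)) PySem.Dict.empty).items

-- ===== PORT B =====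
def animal_locator_alt (dict1 : List (String × List (String × Int))) : List (String × List String × Int) :=
  let grouped :=
    dict1.foldl (fun (acc : PySem.Dict String Int × PySem.Dict String (List (Int × String))) zp =>
      let r := zp.2.foldl
        (fun (s : PySem.Dict String Int × PySem.Dict String (List (Int × String)) × PySem.Set String) t =>
          let totals := s.1.insert t.1 (s.1.getD t.1 0 + t.2)
          if PySem.Set.contains s.2.2 t.1 = false then
            (totals, s.2.1.insert t.1 (s.2.1.getD t.1 [] ++ [(t.2, zp.1)]), PySem.Set.add s.2.2 t.1)
          else (totals, s.2.1, s.2.2))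
        (acc.1, acc.2, PySem.Set.empty)
      (r.1, r.2.1)) (PySem.Dict.empty, PySem.Dict.empty)
  -- totals' keys are distinct, so Source B's final dict comprehension is exactly this map over its items
  grouped.1.items.map (fun p =>
    (p.1, ((PySem.List.sorted2 (grouped.2.getD p.1 []) (fun q => q.1) (fun q => q.2) true).map (fun q => q.2),
           p.2)))

-- ===== PRECONDITION & SPEC =====
-- dict1 encodes a Python dict, so its zoo keys must be distinct: an association list with a
-- duplicated key is not the encoding of any input the Python programs can receive.
def Pre_animal_locator (dict1 : List (String × List (String × Int))) : Prop :=
  (dict1.map Prod.fst).Nodup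
instance (dict1 : List (String × List (String × Int))) : Decidable (Pre_animal_locator dict1) := by
  unfold Pre_animal_locator; infer_instance

def pvWitness_animal_locator : (List (String × List (String × Int))) :=
  [("z1", [("cat", 2), ("dog", 1)]), ("z2", [("cat", 3)])]

def Spec_animal_locator (dict1 : List (String × List (String × Int))) (out : List (String × List String × Int)) : Prop := out = animal_locator_alt dict1
instance (dict1 : List (String × List (String × Int))) (out : List (String × List String × Int)) : Decidable (Spec_animal_locator dict1 out) := by unfold Spec_animal_locator; infer_instance

-- ===== CLAIM (what is proved, stated in full; the proofs are below) =====
def Claim_equal_animal_locator : Prop := ∀ (dict1 : List (String × List (String × Int))), Dom_animal_locator dict1 → Pre_animal_locator dict1 → Spec_animal_locator dict1 (animal_locator dict1)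

-- ===== LEMMAS AND PROOFS =====

-- the shared counting step: totals[a] = totals.get(a, 0) + c
def pvTotStep (d : PySem.Dict String Int) (t : String × Int) : PySem.Dict String Int :=
  d.insert t.1 (d.getD t.1 0 + t.2)

-- the (count, zoo) contribution of one zoo's list for animal i: its first tuple naming i
def pvHit (zoo i : String) (lst : List (String × Int)) : List (Int × String) :=
  ((lst.find? (fun t => i == t.1)).map (fun t => (t.2, zoo))).toList

-- the per-animal (count, zoo) list, in zoo order
def pvLoc2 (i : String) (l : List (String × List (String × Int))) : List (Int × String) :=
  l.filterMap (fun zp => (zp.2.find? (fun t => i == t.1)).map (fun t => (t.2, zp.1)))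

lemma pvLoc2_cons (i : String) (zp : String × List (String × Int)) (l : List (String × List (String × Int))) :
    pvLoc2 i (zp :: l) = pvHit zp.1 i zp.2 ++ pvLoc2 i l := by
  simp only [pvLoc2, pvHit, List.filterMap_cons]
  cases zp.2.find? (fun t => i == t.1) <;> simp

lemma totStep_if (d : PySem.Dict String Int) (t : String × Int) :
    (if d.contains t.1 then d.insert t.1 (d.getD t.1 0 + t.2) else d.insert t.1 t.2) = pvTotStep d t := by
  by_cases h : d.contains t.1 = true
  · simp [h, pvTotStep]
  · have hn : d.get? t.1 = none :=
      (PySem.Dict.get?_eq_none_iff_contains d t.1).mpr (by simpa using h)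
    simp [h, pvTotStep, PySem.Dict.getD, hn]

lemma a_totals_inner (lst : List (String × Int)) :
    ∀ d : PySem.Dict String Int,
      lst.foldl (fun d t =>
        if d.contains t.1 then d.insert t.1 (d.getD t.1 0 + t.2)
        else d.insert t.1 t.2) d = lst.foldl pvTotStep d := by
  intro d
  have hfun : (fun (d : PySem.Dict String Int) (t : String × Int) =>
      if d.contains t.1 then d.insert t.1 (d.getD t.1 0 + t.2)
      else d.insert t.1 t.2) = pvTotStep := by
    funext d t; exact totStep_if d t
  rw [hfun]

lemma a_totals (l : List (String × List (String × Int))) :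
    ∀ d : PySem.Dict String Int,
      l.foldl (fun d zp =>
        zp.2.foldl (fun d t =>
          if d.contains t.1 then d.insert t.1 (d.getD t.1 0 + t.2)
          else d.insert t.1 t.2) d) d
      = l.foldl (fun d zp => zp.2.foldl pvTotStep d) d := by
  intro d
  have hfun : (fun (d : PySem.Dict String Int) (zp : String × List (String × Int)) =>
      zp.2.foldl (fun d t =>
        if d.contains t.1 then d.insert t.1 (d.getD t.1 0 + t.2)
        else d.insert t.1 t.2) d)
      = fun d zp => zp.2.foldl pvTotStep d := by
    funext d zp; exact a_totals_inner zp.2 d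
  rw [hfun]

lemma totals_keys_nodup (l : List (String × List (String × Int))) :
    ∀ d : PySem.Dict String Int, d.keys.Nodup →
      (l.foldl (fun d zp => zp.2.foldl pvTotStep d) d).keys.Nodup := by
  induction l with
  | nil => intro d h; exact h
  | cons zp rest ih =>
    intro d h
    refine ih _ ?_
    exact PySem.Dict.nodup_keys_foldl_insert_key zp.2 Prod.fst
      (fun d t => d.getD t.1 0 + t.2) d h

lemma a_inner_skip (i zoo : String) (lst : List (String × Int)) :
    ∀ st : List String × List (Int × String), zoo ∈ st.1 →
      lst.foldl (fun (st : List String × List (Int × String)) t =>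
        if i == t.1 then
          if st.1.contains zoo = false then (st.1 ++ [zoo], st.2 ++ [(t.2, zoo)])
          else st
        else st) st = st := by
  induction lst with
  | nil => intro st _; rfl
  | cons t rest ih =>
    intro st hm
    have hc : st.1.contains zoo = true := by simpa using hm
    simp only [List.foldl_cons]
    by_cases he : (i == t.1) = true
    · rw [if_pos he, if_neg (by simp [hm])]
      exact ih st hm
    · rw [if_neg he]
      exact ih st hm

lemma a_inner (i zoo : String) (lst : List (String × Int)) :
    ∀ st : List String × List (Int × String), zoo ∉ st.1 →
      lst.foldl (fun (st : List String × List (Int × String)) t =>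
        if i == t.1 then
          if st.1.contains zoo = false then (st.1 ++ [zoo], st.2 ++ [(t.2, zoo)])
          else st
        else st) st
      = (st.1 ++ (pvHit zoo i lst).map (fun _ => zoo), st.2 ++ pvHit zoo i lst) := by
  induction lst with
  | nil => intro st _; simp [pvHit]
  | cons t rest ih =>
    intro st hm
    have hc : st.1.contains zoo = false := by simpa using hm
    simp only [List.foldl_cons]
    by_cases he : (i == t.1) = true
    · rw [if_pos he, if_pos hc]
      have hmem : zoo ∈ (st.1 ++ [zoo], st.2 ++ [(t.2, zoo)]).1 := by simp
      rw [a_inner_skip i zoo rest _ hmem]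
      have hfind : List.find? (fun t => i == t.1) (t :: rest) = some t := by
        simp [List.find?_cons, he]
      simp [pvHit, hfind]
    · rw [if_neg he]
      rw [ih st hm]
      have hfind : List.find? (fun t => i == t.1) (t :: rest)
          = List.find? (fun t => i == t.1) rest := by
        simp [List.find?_cons, he]
      simp [pvHit, hfind]

lemma a_outer (dict1 : List (String × List (String × Int))) (i : String) :
    ∀ st : List String × List (Int × String),
      (∀ zp ∈ dict1, zp.1 ∉ st.1) → (dict1.map Prod.fst).Nodup →
      dict1.foldl (fun (st : List String × List (Int × String)) zp =>
        zp.2.foldl (fun (st : List String × List (Int × String)) t =>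
          if i == t.1 then
            if st.1.contains zp.1 = false then (st.1 ++ [zp.1], st.2 ++ [(t.2, zp.1)])
            else st
          else st) st) st
      = (st.1 ++ (pvLoc2 i dict1).map (fun q => q.2), st.2 ++ pvLoc2 i dict1) := by
  induction dict1 with
  | nil => intro st _ _; simp [pvLoc2]
  | cons zp rest ih =>
    intro st hnotin hnd
    rw [List.map_cons] at hnd
    rcases List.nodup_cons.mp hnd with ⟨hhead, hnd'⟩
    simp only [List.foldl_cons]
    rw [a_inner i zp.1 zp.2 st (hnotin zp (by simp))]
    have hnotin' : ∀ zq ∈ rest, zq.1 ∉ (st.1 ++ (pvHit zp.1 i zp.2).map fun _ => zp.1) := by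
      intro zq hq
      have h1 : zq.1 ∉ st.1 := hnotin zq (by simp [hq])
      have h2 : zq.1 ≠ zp.1 := by
        intro hcontra
        exact hhead (List.mem_map.mpr ⟨zq, hq, hcontra⟩)
      intro hmem
      rcases List.mem_append.mp hmem with h | h
      · exact h1 h
      · rcases List.mem_map.mp h with ⟨w, hw, hwe⟩
        exact h2 hwe.symm
    rw [ih _ hnotin' hnd']
    have hmap : (pvHit zp.1 i zp.2).map (fun _ => zp.1)
        = (pvHit zp.1 i zp.2).map (fun q => q.2) := by
      simp only [pvHit]
      cases zp.2.find? (fun t => i == t.1) <;> simp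
    rw [pvLoc2_cons]
    simp [hmap]

lemma pv_contains_add (s : PySem.Set String) (x y : String) :
    PySem.Set.contains (PySem.Set.add s x) y = (PySem.Set.contains s y || decide (y = x)) := by
  by_cases hys : y ∈ s
  · have h : y ∈ PySem.Set.add s x := (PySem.Set.mem_add s x y).mpr (Or.inl hys)
    simp [PySem.Set.contains, h, hys]
  · by_cases hyx : y = x
    · have h : y ∈ PySem.Set.add s x := (PySem.Set.mem_add s x y).mpr (Or.inr hyx)
      simp [PySem.Set.contains, h, hyx]
    · have h : y ∉ PySem.Set.add s x := by
        intro hh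
        rcases (PySem.Set.mem_add s x y).mp hh with h' | h'
        · exact hys h'
        · exact hyx h'
      simp [PySem.Set.contains, h, hys, hyx]

lemma alt_inner_fst (zoo : String) (lst : List (String × Int)) :
    ∀ s : PySem.Dict String Int × PySem.Dict String (List (Int × String)) × PySem.Set String,
      (lst.foldl (fun (s : PySem.Dict String Int × PySem.Dict String (List (Int × String)) × PySem.Set String) t =>
        if PySem.Set.contains s.2.2 t.1 = false then
          (s.1.insert t.1 (s.1.getD t.1 0 + t.2),
           s.2.1.insert t.1 (s.2.1.getD t.1 [] ++ [(t.2, zoo)]), PySem.Set.add s.2.2 t.1)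
        else (s.1.insert t.1 (s.1.getD t.1 0 + t.2), s.2.1, s.2.2)) s).1
      = lst.foldl pvTotStep s.1 := by
  induction lst with
  | nil => intro s; rfl
  | cons t rest ih =>
    intro s
    simp only [List.foldl_cons]
    by_cases h : PySem.Set.contains s.2.2 t.1 = false
    · simp only [h, if_true]
      exact ih _
    · simp only [h, if_false]
      exact ih _

lemma alt_inner_occ (zoo i : String) (lst : List (String × Int)) :
    ∀ s : PySem.Dict String Int × PySem.Dict String (List (Int × String)) × PySem.Set String,
      ((lst.foldl (fun (s : PySem.Dict String Int × PySem.Dict String (List (Int × String)) × PySem.Set String) t =>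
        if PySem.Set.contains s.2.2 t.1 = false then
          (s.1.insert t.1 (s.1.getD t.1 0 + t.2),
           s.2.1.insert t.1 (s.2.1.getD t.1 [] ++ [(t.2, zoo)]), PySem.Set.add s.2.2 t.1)
        else (s.1.insert t.1 (s.1.getD t.1 0 + t.2), s.2.1, s.2.2)) s).2.1).getD i []
      = s.2.1.getD i [] ++
        (if PySem.Set.contains s.2.2 i = false then pvHit zoo i lst else []) := by
  induction lst with
  | nil =>
    intro s
    by_cases h : PySem.Set.contains s.2.2 i = false <;> simp [h, pvHit]
  | cons t rest ih =>
    intro s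
    simp only [List.foldl_cons]
    by_cases hc : PySem.Set.contains s.2.2 t.1 = false
    · rw [if_pos hc, ih]
      by_cases hi : i = t.1
      · subst hi
        have hfind : List.find? (fun q => t.1 == q.1) (t :: rest) = some t := by
          simp [List.find?_cons]
        have hnm : t.1 ∉ s.2.2 := by simpa [PySem.Set.contains] using hc
        simp [PySem.Dict.getD_insert, pv_contains_add, pvHit, hfind, hnm]
      · have hbeq : (i == t.1) = false := by simpa using hi
        have hfind : List.find? (fun q => i == q.1) (t :: rest)
            = List.find? (fun q => i == q.1) rest := by
          simp [List.find?_cons, hbeq]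
        simp [PySem.Dict.getD_insert, pv_contains_add, hi, hbeq, pvHit, hfind]
    · rw [if_neg hc, ih]
      have hc' : PySem.Set.contains s.2.2 t.1 = true := by
        cases hx : PySem.Set.contains s.2.2 t.1 with
        | false => exact absurd hx hc
        | true => rfl
      by_cases hi : i = t.1
      · subst hi
        have hmm : t.1 ∈ s.2.2 := by simpa [PySem.Set.contains] using hc'
        simp [hmm]
      · have hbeq : (i == t.1) = false := by simpa using hi
        have hfind : List.find? (fun q => i == q.1) (t :: rest)
            = List.find? (fun q => i == q.1) rest := by
          simp [List.find?_cons, hbeq]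
        simp [pvHit, hfind]

lemma alt_fold (dict1 : List (String × List (String × Int))) :
    ∀ acc : PySem.Dict String Int × PySem.Dict String (List (Int × String)),
      (dict1.foldl (fun (acc : PySem.Dict String Int × PySem.Dict String (List (Int × String))) zp =>
        ((zp.2.foldl (fun (s : PySem.Dict String Int × PySem.Dict String (List (Int × String)) × PySem.Set String) t =>
            if PySem.Set.contains s.2.2 t.1 = false then
              (s.1.insert t.1 (s.1.getD t.1 0 + t.2),
               s.2.1.insert t.1 (s.2.1.getD t.1 [] ++ [(t.2, zp.1)]), PySem.Set.add s.2.2 t.1)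
            else (s.1.insert t.1 (s.1.getD t.1 0 + t.2), s.2.1, s.2.2))
          (acc.1, acc.2, PySem.Set.empty)).1,
         (zp.2.foldl (fun (s : PySem.Dict String Int × PySem.Dict String (List (Int × String)) × PySem.Set String) t =>
            if PySem.Set.contains s.2.2 t.1 = false then
              (s.1.insert t.1 (s.1.getD t.1 0 + t.2),
               s.2.1.insert t.1 (s.2.1.getD t.1 [] ++ [(t.2, zp.1)]), PySem.Set.add s.2.2 t.1)
            else (s.1.insert t.1 (s.1.getD t.1 0 + t.2), s.2.1, s.2.2))
          (acc.1, acc.2, PySem.Set.empty)).2.1)) acc).1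
      = dict1.foldl (fun d zp => zp.2.foldl pvTotStep d) acc.1
      ∧ ∀ i, ((dict1.foldl (fun (acc : PySem.Dict String Int × PySem.Dict String (List (Int × String))) zp =>
        ((zp.2.foldl (fun (s : PySem.Dict String Int × PySem.Dict String (List (Int × String)) × PySem.Set String) t =>
            if PySem.Set.contains s.2.2 t.1 = false then
              (s.1.insert t.1 (s.1.getD t.1 0 + t.2),
               s.2.1.insert t.1 (s.2.1.getD t.1 [] ++ [(t.2, zp.1)]), PySem.Set.add s.2.2 t.1)
            else (s.1.insert t.1 (s.1.getD t.1 0 + t.2), s.2.1, s.2.2))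
          (acc.1, acc.2, PySem.Set.empty)).1,
         (zp.2.foldl (fun (s : PySem.Dict String Int × PySem.Dict String (List (Int × String)) × PySem.Set String) t =>
            if PySem.Set.contains s.2.2 t.1 = false then
              (s.1.insert t.1 (s.1.getD t.1 0 + t.2),
               s.2.1.insert t.1 (s.2.1.getD t.1 [] ++ [(t.2, zp.1)]), PySem.Set.add s.2.2 t.1)
            else (s.1.insert t.1 (s.1.getD t.1 0 + t.2), s.2.1, s.2.2))
          (acc.1, acc.2, PySem.Set.empty)).2.1)) acc).2).getD i []
        = acc.2.getD i [] ++ pvLoc2 i dict1 := by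
  induction dict1 with
  | nil => intro acc; exact ⟨rfl, fun i => by simp [pvLoc2]⟩
  | cons zp rest ih =>
    intro acc
    simp only [List.foldl_cons]
    constructor
    · rw [(ih _).1]
      congr 1
      exact alt_inner_fst zp.1 zp.2 _
    · intro i
      rw [(ih _).2 i]
      rw [alt_inner_occ zp.1 i zp.2 _]
      have hemp : PySem.Set.contains (PySem.Set.empty : PySem.Set String) i = false := rfl
      rw [hemp]
      simp [pvLoc2_cons]

-- A's second phase: folding inserts over the items of the totals dict, computing each
-- animal's zoo list by rescanning dict1; evaluated via a_outer
lemma a_phase2 (dict1 : List (String × List (String × Int)))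
    (hpre : (dict1.map Prod.fst).Nodup) :
    ∀ (l : List (String × Int)) (res : PySem.Dict String (List String × Int)),
      (l.map Prod.fst).Nodup → (∀ p ∈ l, res.contains p.1 = false) →
      (l.foldl (fun (res : PySem.Dict String (List String × Int)) p =>
        res.insert p.1
          ((PySem.List.sorted2 ((dict1.foldl (fun (st : List String × List (Int × String)) zp =>
              zp.2.foldl (fun (st : List String × List (Int × String)) t =>
                if p.1 == t.1 then
                  if st.1.contains zp.1 = false then (st.1 ++ [zp.1], st.2 ++ [(t.2, zp.1)])
                  else st
                else st) st) (([], []) : List String × List (Int × String))).2)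
            (fun q => q.1) (fun q => q.2) true).foldl (fun loc q => loc ++ [q.2]) ([] : List String),
           p.2)) res).items
      = res.items ++ l.map (fun p =>
          (p.1, ((PySem.List.sorted2 (pvLoc2 p.1 dict1) (fun q => q.1) (fun q => q.2) true).map
                   (fun q => q.2), p.2))) := by
  intro l
  induction l with
  | nil => intro res _ _; simp
  | cons p rest ih =>
    intro res hnd hcont
    simp only [List.foldl_cons]
    have hpass := a_outer dict1 p.1 (([], []) : List String × List (Int × String))
      (by intro zp _; simp) hpre
    rw [hpass]
    have hloc : (PySem.List.sorted2 ((([] : List String) ++ (pvLoc2 p.1 dict1).map (fun q => q.2),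
        ([] : List (Int × String)) ++ pvLoc2 p.1 dict1).2) (fun q => q.1) (fun q => q.2) true).foldl
          (fun loc q => loc ++ [q.2]) ([] : List String)
        = (PySem.List.sorted2 (pvLoc2 p.1 dict1) (fun q => q.1) (fun q => q.2) true).map (fun q => q.2) := by
      simp only [PySem.List.foldl_append_singleton_eq_map, List.nil_append]
    rw [hloc]
    have hnd' : (rest.map Prod.fst).Nodup := by simpa using hnd.of_cons
    have hcont' : ∀ q ∈ rest,
        (res.insert p.1 ((PySem.List.sorted2 (pvLoc2 p.1 dict1) (fun q => q.1) (fun q => q.2) true).map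
          (fun q => q.2), p.2)).contains q.1 = false := by
      intro q hq
      rw [PySem.Dict.contains_insert]
      have h2 : q.1 ≠ p.1 := by
        intro hcontra
        have : p.1 ∈ rest.map Prod.fst := hcontra ▸ List.mem_map.mpr ⟨q, hq, rfl⟩
        exact (List.nodup_cons.mp (by simpa using hnd)).1 this
      simp [h2, hcont q (by simp [hq])]
    rw [ih _ hnd' hcont']
    rw [PySem.Dict.items_insert_of_not_contains res _ (hcont p (by simp))]
    simp

-- ===== VERDICT (by name: the statement is the Claim_ definition above) =====
theorem animal_locator_spec : Claim_equal_animal_locator := by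
  intro dict1 _ hpre
  show animal_locator dict1 = animal_locator_alt dict1
  simp only [animal_locator, animal_locator_alt]
  have halt := alt_fold dict1 (PySem.Dict.empty, PySem.Dict.empty)
  rw [halt.1]
  simp only [halt.2]
  rw [← a_totals]
  set T := dict1.foldl (fun d zp =>
      zp.2.foldl (fun d t =>
        if d.contains t.1 then d.insert t.1 (d.getD t.1 0 + t.2)
        else d.insert t.1 t.2) d) PySem.Dict.empty with hT
  have hTkeys : T.keys.Nodup := by
    rw [hT, a_totals]
    exact totals_keys_nodup dict1 PySem.Dict.empty (by simp [PySem.Dict.keys, PySem.Dict.empty])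
  have hcont0 : ∀ p ∈ T.items, (PySem.Dict.empty : PySem.Dict String (List String × Int)).contains p.1 = false := by
    intro p _; rfl
  rw [a_phase2 dict1 hpre T.items PySem.Dict.empty (by simpa [PySem.Dict.keys] using hTkeys) hcont0]
  have hemp : (PySem.Dict.empty : PySem.Dict String (List String × Int)).items = [] := rfl
  simp [hemp, PySem.Dict.getD_empty]
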